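-- pv_equiv track=rewrite | github.com/ducalpha/PurPlianceOpenSource | src/oppnlp/analyze/priv_stmt/priv_stmt_extractor_utils.py | get_multi_tag_ranges
-- ===== SOURCE A (Python) =====
-- def _get_end_of_tag(tags, tag_name, start_idx):
--     """End of tag is either the end of array or the start of another tag."""
--     begin_tag = 'B-' + tag_name
--     assert tags[start_idx] == begin_tag, f'Should start at {begin_tag}'
--
--     idx = start_idx + 1
--     while idx < len(tags):
--         cur_tag = tags[idx]
--         if cur_tag.startswith('B-') or cur_tag == 'O':
--             break
--
--         idx += 1
--
--     return idx
--
-- def get_multi_tag_ranges(tags, tag_name):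
--     """Get all the ranges from B-tag_name to I-tag_name."""
--     start_end_pairs = []
--     start = -1
--     while True:
--         try:
--             start = tags.index('B-' + tag_name, start + 1)
--             end = _get_end_of_tag(tags, tag_name, start)
--             start_end_pairs.append((start, end))
--         except ValueError:
--             break
--     return start_end_pairs
-- ===== SOURCE B (Python) =====
-- def get_multi_tag_ranges(tags, tag_name):
--     """Get all the ranges from B-tag_name to I-tag_name (single state-machine pass)."""
--     begin_tag = 'B-' + tag_name
--     pairs = []
--     i = 0
--     n = len(tags)
--     while i < n:
--         if tags[i] == begin_tag:
--             start = i
--             i += 1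
--             while i < n and not (tags[i].startswith('B-') or tags[i] == 'O'):
--                 i += 1
--             pairs.append((start, i))
--         else:
--             i += 1
--     return pairs
-- ===== Notes on version B (the rewrite author's own statement) =====
-- stated objective: simpler
-- what changed: Replaced the repeated tags.index/try-except ValueError search plus the _get_end_of_tag helper with one inlined single-pass state machine over the tag list that emits (start, end) as it scans.
import Mathlib
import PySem

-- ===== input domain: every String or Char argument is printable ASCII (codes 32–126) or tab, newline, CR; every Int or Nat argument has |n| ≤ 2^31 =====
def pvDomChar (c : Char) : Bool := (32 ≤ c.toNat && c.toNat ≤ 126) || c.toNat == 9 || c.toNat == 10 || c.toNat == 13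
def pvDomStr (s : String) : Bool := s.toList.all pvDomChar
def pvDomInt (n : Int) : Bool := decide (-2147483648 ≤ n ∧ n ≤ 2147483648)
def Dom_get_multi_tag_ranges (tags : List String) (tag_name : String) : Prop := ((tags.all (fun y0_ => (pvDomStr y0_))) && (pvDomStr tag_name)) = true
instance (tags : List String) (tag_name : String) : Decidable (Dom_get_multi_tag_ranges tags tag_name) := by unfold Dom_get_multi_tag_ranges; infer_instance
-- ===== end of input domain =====

-- B replaces A's repeated list.index/try-except search plus helper with one inlined
-- state-machine pass over the tag list (objective: simpler); same return value everywhere.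

-- ===== PORT A =====
-- strings are handled on the List Char side (PySem.Chars), per the PySem convention

-- tags.index(v, start) for 0 ≤ start: first index ≥ start holding v, none = ValueError.
-- (hand port; exact for the nonnegative start A always passes)
def pvIndexFrom (xs : List (List Char)) (v : List Char) (j : Nat) : Option Nat :=
  if h : j < xs.length then
    if xs[j] = v then some j else pvIndexFrom xs v (j + 1)
  else none
termination_by xs.length - j

-- bound on the found index (cited by pvLoopA's decreasing_by)
theorem pvIndexFrom_bounds (xs : List (List Char)) (v : List Char) :
    ∀ j k, pvIndexFrom xs v j = some k → j ≤ k ∧ k < xs.length := by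
  intro j
  induction j using pvIndexFrom.induct xs v with
  | case1 j hj heq =>
    intro k h
    rw [pvIndexFrom, dif_pos hj, if_pos heq] at h
    injection h with h2
    omega
  | case2 j hj hne ih =>
    intro k h
    rw [pvIndexFrom, dif_pos hj, if_neg hne] at h
    have := ih k h
    omega
  | case3 j hj =>
    intro k h
    rw [pvIndexFrom, dif_neg hj] at h
    cases h

-- the while-loop of _get_end_of_tag
def pvEndLoop (xs : List (List Char)) (idx : Nat) : Nat :=
  if h : idx < xs.length then
    if PySem.Chars.startswith xs[idx] ['B', '-'] || xs[idx] = ['O'] then idx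
    else pvEndLoop xs (idx + 1)
  else idx
termination_by xs.length - idx

-- _get_end_of_tag (its assert always holds at A's call sites: tags[start_idx] was just found by index)
def pvGetEndOfTag (xs : List (List Char)) (start_idx : Nat) : Nat :=
  pvEndLoop xs (start_idx + 1)

-- the 'while True: start = tags.index(begin_tag, start + 1) …' loop; f = start + 1
def pvLoopA (xs : List (List Char)) (bt : List Char) (f : Nat) : List (Int × Int) :=
  match h : pvIndexFrom xs bt f with
  | some s => ((s : Int), ((pvGetEndOfTag xs s : Nat) : Int)) :: pvLoopA xs bt (s + 1)
  | none => []
termination_by xs.length - f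
decreasing_by have := pvIndexFrom_bounds xs bt f s h; omega

def get_multi_tag_ranges (tags : List String) (tag_name : String) : List (Int × Int) :=
  pvLoopA (tags.map String.toList) ('B' :: '-' :: tag_name.toList) 0

-- ===== PORT B =====
-- the inner 'while i < n and not (tags[i].startswith("B-") or tags[i] == "O"): i += 1'
def pvSkipInside (xs : List (List Char)) (i : Nat) : Nat :=
  if h : i < xs.length then
    if PySem.Chars.startswith xs[i] ['B', '-'] || xs[i] = ['O'] then i
    else pvSkipInside xs (i + 1)
  else i
termination_by xs.length - i

-- the skip never moves left (cited by pvLoopB's decreasing_by)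
theorem pvSkipInside_ge (xs : List (List Char)) (i : Nat) : i ≤ pvSkipInside xs i := by
  induction i using pvSkipInside.induct xs with
  | case1 i hi hstop => rw [pvSkipInside, dif_pos hi, if_pos hstop]
  | case2 i hi hgo ih => rw [pvSkipInside, dif_pos hi, if_neg hgo]; omega
  | case3 i hi => rw [pvSkipInside, dif_neg hi]

-- the outer single pass: while i < n: if tags[i] == begin_tag: … else: i += 1
def pvLoopB (xs : List (List Char)) (bt : List Char) (i : Nat) : List (Int × Int) :=
  if h : i < xs.length then
    if xs[i] = bt then
      ((i : Int), ((pvSkipInside xs (i + 1) : Nat) : Int)) :: pvLoopB xs bt (pvSkipInside xs (i + 1))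
    else pvLoopB xs bt (i + 1)
  else []
termination_by xs.length - i
decreasing_by
  · have := pvSkipInside_ge xs (i + 1); omega
  · omega

def get_multi_tag_ranges_alt (tags : List String) (tag_name : String) : List (Int × Int) :=
  pvLoopB (tags.map String.toList) ('B' :: '-' :: tag_name.toList) 0

-- ===== PRECONDITION & SPEC =====
def Spec_get_multi_tag_ranges (tags : List String) (tag_name : String) (out : List (Int × Int)) : Prop := out = get_multi_tag_ranges_alt tags tag_name
instance (tags : List String) (tag_name : String) (out : List (Int × Int)) : Decidable (Spec_get_multi_tag_ranges tags tag_name out) := by unfold Spec_get_multi_tag_ranges; infer_instance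

-- ===== CLAIM (what is proved, stated in full; the proofs are below) =====
def Claim_equal_get_multi_tag_ranges : Prop := ∀ (tags : List String) (tag_name : String), Dom_get_multi_tag_ranges tags tag_name → Spec_get_multi_tag_ranges tags tag_name (get_multi_tag_ranges tags tag_name)

-- ===== LEMMAS AND PROOFS =====

-- the two (textually identical) inner while-loops agree
theorem endLoop_eq_skip (xs : List (List Char)) (i : Nat) :
    pvEndLoop xs i = pvSkipInside xs i := by
  induction i using pvEndLoop.induct xs with
  | case1 i hi hstop =>
    rw [pvEndLoop, dif_pos hi, if_pos hstop, pvSkipInside, dif_pos hi, if_pos hstop]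
  | case2 i hi hgo ih =>
    rw [pvEndLoop, dif_pos hi, if_neg hgo, pvSkipInside, dif_pos hi, if_neg hgo, ih]
  | case3 i hi =>
    rw [pvEndLoop, dif_neg hi, pvSkipInside, dif_neg hi]

-- the begin tag "B-" + tag_name itself starts with "B-"
theorem bt_startswith (r : List Char) :
    PySem.Chars.startswith ('B' :: '-' :: r) ['B', '-'] = true := by
  rw [PySem.Chars.startswith_iff]
  exact ⟨r, rfl⟩

-- pvLoopA depends on f only through the value of pvIndexFrom xs bt f
theorem loopA_congr (xs : List (List Char)) (bt : List Char) (f g : Nat)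
    (h : pvIndexFrom xs bt f = pvIndexFrom xs bt g) : pvLoopA xs bt f = pvLoopA xs bt g := by
  rw [pvLoopA.eq_def]
  conv_rhs => rw [pvLoopA.eq_def]
  rw [h]

-- the region [i, pvSkipInside xs i) contains no begin tag, so the index
-- search from i and from pvSkipInside xs i find the same occurrence
theorem indexFrom_skip (xs : List (List Char)) (r : List Char) (i : Nat) :
    pvIndexFrom xs ('B' :: '-' :: r) i = pvIndexFrom xs ('B' :: '-' :: r) (pvSkipInside xs i) := by
  induction i using pvSkipInside.induct xs with
  | case1 i hi hstop => rw [pvSkipInside, dif_pos hi, if_pos hstop]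
  | case2 i hi hgo ih =>
    rw [pvSkipInside, dif_pos hi, if_neg hgo]
    have hne : ¬ xs[i] = 'B' :: '-' :: r := by
      intro he
      exact hgo (by rw [he]; simp [bt_startswith])
    calc pvIndexFrom xs ('B' :: '-' :: r) i
        = pvIndexFrom xs ('B' :: '-' :: r) (i + 1) := by
          conv_lhs => rw [pvIndexFrom]
          rw [dif_pos hi, if_neg hne]
      _ = pvIndexFrom xs ('B' :: '-' :: r) (pvSkipInside xs (i + 1)) := ih
  | case3 i hi => rw [pvSkipInside, dif_neg hi]

-- main loop equivalence: the single pass equals the repeated index search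
theorem loopB_eq_loopA (xs : List (List Char)) (r : List Char) (i : Nat) :
    pvLoopB xs ('B' :: '-' :: r) i = pvLoopA xs ('B' :: '-' :: r) i := by
  induction i using pvLoopB.induct xs ('B' :: '-' :: r) with
  | case1 i hi heq ih =>
    rw [pvLoopB, dif_pos hi, if_pos heq]
    have hidx : pvIndexFrom xs ('B' :: '-' :: r) i = some i := by
      rw [pvIndexFrom, dif_pos hi, if_pos heq]
    conv_rhs => rw [pvLoopA.eq_def, hidx]
    refine congrArg₂ List.cons ?_ ?_
    · rw [pvGetEndOfTag, endLoop_eq_skip]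
    · rw [ih]
      exact loopA_congr xs _ _ _ (indexFrom_skip xs r (i + 1)).symm
  | case2 i hi hne ih =>
    rw [pvLoopB, dif_pos hi, if_neg hne, ih]
    apply loopA_congr
    conv_rhs => rw [pvIndexFrom]
    rw [dif_pos hi, if_neg hne]
  | case3 i hi =>
    rw [pvLoopB, dif_neg hi]
    have hnone : pvIndexFrom xs ('B' :: '-' :: r) i = none := by
      rw [pvIndexFrom, dif_neg hi]
    rw [pvLoopA.eq_def, hnone]

-- ===== VERDICT (by name: the statement is the Claim_ definition above) =====
theorem get_multi_tag_ranges_spec : Claim_equal_get_multi_tag_ranges := by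
  intro tags tag_name _
  unfold Spec_get_multi_tag_ranges get_multi_tag_ranges get_multi_tag_ranges_alt
  exact (loopB_eq_loopA (tags.map String.toList) tag_name.toList 0).symm
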